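-- pv_equiv track=rewrite | github.com/bpupadhyaya/programming-interviews | top/topamzbyfrequency/python/group1/maximum_units_on_a_truck.py | maximum_units_1
-- ===== SOURCE A (Python) =====
-- def maximum_units_1(box_types: list[list[int]], truck_size: int) -> int:
--     box_types = sorted(box_types, key=lambda x: x[1], reverse=True)
--     output = 0
--     for no, units in box_types:
--         if truck_size > no:
--             truck_size -= no
--             output += (no * units)
--         else:
--             output += (truck_size * units)
--             break
--     return output
-- ===== SOURCE B (Python) =====
-- def maximum_units_1(box_types: list[list[int]], truck_size: int) -> int:
--     # Aggregate: total number of boxes per distinct units value, then one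
--     # greedy pass over the distinct units values in descending order.
--     totals = {}
--     for no, units in box_types:
--         totals[units] = totals.get(units, 0) + no
--     output = 0
--     for units in sorted(totals, reverse=True):
--         total = totals[units]
--         if truck_size > total:
--             truck_size -= total
--             output += total * units
--         else:
--             output += truck_size * units
--             break
--     return output
-- ===== Notes on version B (the rewrite author's own statement) =====
-- stated objective: alternative
-- what changed: Instead of sorting all boxes and scanning them one by one, B aggregates the box counts per distinct units value into a dict in one pass and then runs the greedy fill over the sorted distinct units values, so the scan length is the number of distinct units values rather than the number of boxes.
-- outside the precondition, e.g. on maximum_units_1([[5, 10], [-5, 10]], 3): A returns 30, B returns 0; on maximum_units_1([[5, 4], [1, 2, 7]], 3): A returns 12, B raises ValueError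
import Mathlib
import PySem

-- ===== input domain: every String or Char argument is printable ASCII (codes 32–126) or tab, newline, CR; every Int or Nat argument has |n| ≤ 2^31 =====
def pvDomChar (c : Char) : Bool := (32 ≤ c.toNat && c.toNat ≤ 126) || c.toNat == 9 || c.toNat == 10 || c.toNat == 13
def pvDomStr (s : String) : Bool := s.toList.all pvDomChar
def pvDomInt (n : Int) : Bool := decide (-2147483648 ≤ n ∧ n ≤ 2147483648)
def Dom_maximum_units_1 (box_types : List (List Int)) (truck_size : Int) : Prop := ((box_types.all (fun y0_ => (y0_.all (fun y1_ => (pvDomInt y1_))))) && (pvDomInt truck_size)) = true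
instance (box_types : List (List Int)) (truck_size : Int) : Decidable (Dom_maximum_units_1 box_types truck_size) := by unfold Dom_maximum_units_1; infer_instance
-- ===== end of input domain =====

-- B replaces A's sort-all-boxes-then-scan greedy by a per-distinct-units aggregation dict followed by a
-- greedy pass over the sorted distinct units values (objective: alternative decomposition, same results).

-- ===== PORT A =====
-- row[0] / row[1] (the unpacking 'no, units' and the sort key x[1]) are exact for rows of length 2,
-- which Pre_ guarantees; pyGetD is the total form of the subscript under that precondition.
def pvNo (r : List Int) : Int := PySem.List.pyGetD r 0 0
def pvUnits (r : List Int) : Int := PySem.List.pyGetD r 1 0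

def pvLoopA : List (List Int) → Int → Int → Int
  | [], _, output => output
  | r :: rest, truck_size, output =>
    if truck_size > pvNo r then
      pvLoopA rest (truck_size - pvNo r) (output + pvNo r * pvUnits r)
    else
      output + truck_size * pvUnits r

def maximum_units_1 (box_types : List (List Int)) (truck_size : Int) : Int :=
  pvLoopA (PySem.List.sorted box_types pvUnits true) truck_size 0

-- ===== PORT B =====
def pvTotals (box_types : List (List Int)) : PySem.Dict Int Int :=
  box_types.foldl (fun d r => d.modify (pvUnits r) 0 (fun t => t + pvNo r)) PySem.Dict.empty

def pvLoopB (d : PySem.Dict Int Int) : List Int → Int → Int → Int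
  | [], _, output => output
  | u :: us, truck_size, output =>
    if truck_size > d.getD u 0 then
      pvLoopB d us (truck_size - d.getD u 0) (output + d.getD u 0 * u)
    else
      output + truck_size * u

def maximum_units_1_alt (box_types : List (List Int)) (truck_size : Int) : Int :=
  let totals := pvTotals box_types
  pvLoopB totals (PySem.List.sorted totals.keys (fun u => u) true) truck_size 0

-- ===== PRECONDITION & SPEC =====
-- Pre_ excludes rows whose length is not 2 — Python raises ValueError/IndexError unpacking or sorting them
-- (A only returns past such a row when its break accidentally precedes it) — and negative box counts,
-- which lie outside the task's natural domain and on which A's per-box break point is an implementation artefact.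
def Pre_maximum_units_1 (box_types : List (List Int)) (truck_size : Int) : Prop :=
  ∀ r ∈ box_types, r.length = 2 ∧ 0 ≤ pvNo r
instance (box_types : List (List Int)) (truck_size : Int) : Decidable (Pre_maximum_units_1 box_types truck_size) := by
  unfold Pre_maximum_units_1; infer_instance

def pvWitness_maximum_units_1 : List (List Int) × Int := ([[1, 3], [2, 2]], 4)

def Spec_maximum_units_1 (box_types : List (List Int)) (truck_size : Int) (out : Int) : Prop := out = maximum_units_1_alt box_types truck_size
instance (box_types : List (List Int)) (truck_size : Int) (out : Int) : Decidable (Spec_maximum_units_1 box_types truck_size out) := by unfold Spec_maximum_units_1; infer_instance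

-- ===== CLAIM (what is proved, stated in full; the proofs are below) =====
def Claim_equal_maximum_units_1 : Prop := ∀ (box_types : List (List Int)) (truck_size : Int), Dom_maximum_units_1 box_types truck_size → Pre_maximum_units_1 box_types truck_size → Spec_maximum_units_1 box_types truck_size (maximum_units_1 box_types truck_size)

-- ===== LEMMAS AND PROOFS =====

-- the boxes of L whose units value is u, and the total box count of a list of boxes
def pvGroup (u : Int) (L : List (List Int)) : List (List Int) := L.filter (fun r => pvUnits r == u)
def pvSumNo (L : List (List Int)) : Int := (L.map pvNo).sum

-- A's loop, parametrised by the per-units totals function (pvLoopB with the dict lookup abstracted)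
def pvLoopT (t : Int → Int) : List Int → Int → Int → Int
  | [], _, output => output
  | u :: us, truck_size, output =>
    if truck_size > t u then pvLoopT t us (truck_size - t u) (output + t u * u)
    else output + truck_size * u

lemma pvLoopB_eq_loopT (d : PySem.Dict Int Int) (us : List Int) (truck out : Int) :
    pvLoopB d us truck out = pvLoopT (fun u => d.getD u 0) us truck out := by
  induction us generalizing truck out with
  | nil => rfl
  | cons u us ih => simp only [pvLoopB, pvLoopT]; split_ifs <;> simp [ih]

lemma pvSumNo_nonneg (L : List (List Int)) (h : ∀ r ∈ L, 0 ≤ pvNo r) : 0 ≤ pvSumNo L := by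
  induction L with
  | nil => simp [pvSumNo]
  | cons r L ih =>
    have := h r (by simp)
    have := ih (fun x hx => h x (by simp [hx]))
    simp only [pvSumNo, List.map_cons, List.sum_cons] at *
    omega

-- A's loop consumes a nonempty run of boxes with a common units value u and nonnegative counts
-- exactly as one aggregated step does.
lemma pvLoopA_run (u : Int) (G rest : List (List Int)) (hne : G ≠ [])
    (hk : ∀ r ∈ G, pvUnits r = u) (hc : ∀ r ∈ G, 0 ≤ pvNo r) (truck out : Int) :
    pvLoopA (G ++ rest) truck out =
      if truck > pvSumNo G then pvLoopA rest (truck - pvSumNo G) (out + pvSumNo G * u)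
      else out + truck * u := by
  induction G generalizing truck out with
  | nil => exact absurd rfl hne
  | cons r G ih =>
    have hru : pvUnits r = u := hk r (by simp)
    have hsum : pvSumNo (r :: G) = pvNo r + pvSumNo G := by simp [pvSumNo]
    have h0r : 0 ≤ pvNo r := hc r (by simp)
    have h0G : 0 ≤ pvSumNo G := pvSumNo_nonneg G (fun x hx => hc x (by simp [hx]))
    by_cases hG : G = []
    · subst hG
      simp only [List.singleton_append, pvLoopA, hru, pvSumNo, List.map_cons,
        List.map_nil, List.sum_cons, List.sum_nil, add_zero]
    · simp only [List.cons_append, pvLoopA, hru]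
      by_cases h1 : truck > pvNo r
      · rw [if_pos h1, ih hG (fun x hx => hk x (by simp [hx])) (fun x hx => hc x (by simp [hx]))]
        by_cases h2 : truck > pvSumNo (r :: G)
        · rw [if_pos h2, if_pos (by omega : truck - pvNo r > pvSumNo G)]
          congr 1
          · omega
          · rw [hsum]; ring
        · rw [if_neg h2, if_neg (by omega : ¬ truck - pvNo r > pvSumNo G)]
          ring
      · rw [if_neg h1, if_neg (by omega : ¬ truck > pvSumNo (r :: G))]

-- every element of dropWhile (units == u) has units < u, for a desc-sorted list bounded by u
lemma pvDropWhile_lt (u : Int) : ∀ (S : List (List Int)),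
    List.Pairwise (fun a b => pvUnits b ≤ pvUnits a) S →
    (∀ x ∈ S, pvUnits x ≤ u) →
    ∀ x ∈ S.dropWhile (fun r => pvUnits r == u), pvUnits x < u := by
  intro S
  induction S with
  | nil => simp
  | cons a S ih =>
    intro hpw hle x hx
    by_cases ha : pvUnits a = u
    · rw [List.dropWhile_cons_of_pos (by simp [ha])] at hx
      exact ih (List.pairwise_cons.mp hpw).2 (fun y hy => hle y (by simp [hy])) x hx
    · rw [List.dropWhile_cons_of_neg (by simp [ha])] at hx
      rcases List.mem_cons.mp hx with rfl | hx
      · exact lt_of_le_of_ne (hle x (by simp)) ha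
      · have h1 : pvUnits x ≤ pvUnits a := (List.pairwise_cons.mp hpw).1 x hx
        have h2 : pvUnits a ≤ u := hle a (by simp)
        omega

lemma pvGroup_append (u : Int) (G R : List (List Int)) :
    pvGroup u (G ++ R) = pvGroup u G ++ pvGroup u R := by
  simp [pvGroup]

-- main loop lemma: A's scan of a desc-sorted list equals the aggregated scan over the
-- strictly descending list of its distinct units values
lemma pvMain : ∀ (n : Nat) (S : List (List Int)), S.length < n →
    List.Pairwise (fun a b => pvUnits b ≤ pvUnits a) S →
    (∀ r ∈ S, 0 ≤ pvNo r) →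
    ∀ (us : List Int) (t : Int → Int),
      List.Pairwise (fun a b => b < a) us →
      (∀ u, u ∈ us ↔ ∃ r ∈ S, pvUnits r = u) →
      (∀ u ∈ us, t u = pvSumNo (pvGroup u S)) →
      ∀ truck out, pvLoopA S truck out = pvLoopT t us truck out := by
  intro n
  induction n with
  | zero => intro S h; omega
  | succ n ih =>
    intro S hlen hpw hc us t hus hmem ht truck out
    match S with
    | [] =>
      have : us = [] := by
        cases us with
        | nil => rfl
        | cons v us' => exact absurd ((hmem v).mp (by simp)) (by simp)
      subst this; rfl
    | r :: S' =>
      have hu0 : pvUnits r ∈ us := (hmem (pvUnits r)).mpr ⟨r, by simp, rfl⟩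
      match us, hu0 with
      | v :: us', hu0 =>
        have hhead : ∀ b ∈ us', b < v := (List.pairwise_cons.mp hus).1
        have hkeyle : ∀ x ∈ r :: S', pvUnits x ≤ pvUnits r := by
          intro x hx
          rcases List.mem_cons.mp hx with rfl | hx
          · exact le_refl _
          · exact (List.pairwise_cons.mp hpw).1 x hx
        have hvle : v ≤ pvUnits r := by
          obtain ⟨x, hxS, hxv⟩ := (hmem v).mp (by simp)
          rw [← hxv]; exact hkeyle x hxS
        have hveq : v = pvUnits r := by
          rcases List.mem_cons.mp hu0 with h | h
          · omega
          · have := hhead (pvUnits r) h; omega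
        subst hveq
        -- split S into the leading run G of units v and the remainder R
        have hpr : (fun x => pvUnits x == pvUnits r) r = true := by simp
        have hG : (r :: S').takeWhile (fun x => pvUnits x == pvUnits r)
            = r :: S'.takeWhile (fun x => pvUnits x == pvUnits r) :=
          List.takeWhile_cons_of_pos hpr
        have hR : (r :: S').dropWhile (fun x => pvUnits x == pvUnits r)
            = S'.dropWhile (fun x => pvUnits x == pvUnits r) :=
          List.dropWhile_cons_of_pos hpr
        generalize hGdef : (r :: S').takeWhile (fun x => pvUnits x == pvUnits r) = G at hG
        generalize hRdef : (r :: S').dropWhile (fun x => pvUnits x == pvUnits r) = R at hR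
        have hsplit : r :: S' = G ++ R := by rw [← hGdef, ← hRdef, List.takeWhile_append_dropWhile]
        have hGne : G ≠ [] := by rw [hG]; simp
        have hGk : ∀ x ∈ G, pvUnits x = pvUnits r := by
          intro x hx
          rw [← hGdef] at hx
          simpa using List.mem_takeWhile_imp hx
        have hRlt : ∀ x ∈ R, pvUnits x < pvUnits r := by
          rw [← hRdef]
          exact pvDropWhile_lt (pvUnits r) (r :: S') hpw hkeyle
        have hRsub : R.Sublist (r :: S') := by
          rw [← hRdef]; exact List.dropWhile_sublist _
        have hcG : ∀ x ∈ G, 0 ≤ pvNo x := fun x hx => hc x (by rw [hsplit]; exact List.mem_append_left _ hx)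
        have hcR : ∀ x ∈ R, 0 ≤ pvNo x := fun x hx => hc x (hRsub.subset hx)
        -- the leading run is exactly the group of S at units r, and groups at other units live in R
        have hGgroup : pvGroup (pvUnits r) (r :: S') = G := by
          rw [hsplit, pvGroup_append]
          have h1 : pvGroup (pvUnits r) G = G := List.filter_eq_self.mpr (fun x hx => by simp [hGk x hx])
          have h2 : pvGroup (pvUnits r) R = [] := List.filter_eq_nil_iff.mpr (fun x hx => by
            have := hRlt x hx; simp; omega)
          rw [h1, h2, List.append_nil]
        have hGroupR : ∀ u, u ≠ pvUnits r → pvGroup u (r :: S') = pvGroup u R := by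
          intro u hu
          rw [hsplit, pvGroup_append]
          have h1 : pvGroup u G = [] := List.filter_eq_nil_iff.mpr (fun x hx => by
            have := hGk x hx; simp; omega)
          rw [h1, List.nil_append]
        have htv : t (pvUnits r) = pvSumNo G := by rw [ht (pvUnits r) (by simp), hGgroup]
        -- rewrite A's side with the run lemma
        rw [hsplit, pvLoopA_run (pvUnits r) G R hGne hGk hcG]
        simp only [pvLoopT, htv]
        by_cases hif : truck > pvSumNo G
        · rw [if_pos hif, if_pos hif]
          -- recurse on R and us'
          have hlenR : R.length < n := by
            have h1 : (S'.dropWhile (fun x => pvUnits x == pvUnits r)).Sublist S' :=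
              List.dropWhile_sublist _
            have h2 := h1.length_le
            simp only [List.length_cons] at hlen
            rw [hR]
            omega
          have hpwR : List.Pairwise (fun a b => pvUnits b ≤ pvUnits a) R := hpw.sublist hRsub
          have husR : List.Pairwise (fun a b : Int => b < a) us' := (List.pairwise_cons.mp hus).2
          have hmemR : ∀ u, u ∈ us' ↔ ∃ x ∈ R, pvUnits x = u := by
            intro u
            constructor
            · intro hu
              have huv : u < pvUnits r := hhead u hu
              obtain ⟨x, hxS, hxu⟩ := (hmem u).mp (by simp [hu])
              rw [hsplit] at hxS
              rcases List.mem_append.mp hxS with hx | hx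
              · exact absurd (hGk x hx) (by omega)
              · exact ⟨x, hx, hxu⟩
            · intro ⟨x, hxR, hxu⟩
              have h1 : u ∈ pvUnits r :: us' := (hmem u).mpr ⟨x, hRsub.subset hxR, hxu⟩
              have h2 : u < pvUnits r := by rw [← hxu]; exact hRlt x hxR
              rcases List.mem_cons.mp h1 with rfl | h
              · omega
              · exact h
          have htR : ∀ u ∈ us', t u = pvSumNo (pvGroup u R) := by
            intro u hu
            rw [ht u (by simp [hu]), hGroupR u (by have := hhead u hu; omega)]
          exact ih R hlenR hpwR hcR us' t husR hmemR htR _ _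
        · rw [if_neg hif, if_neg hif]

-- characterisation of B's totals dict: getD is the total box count of the units-group
lemma pvTotals_getD_aux (L : List (List Int)) : ∀ (d : PySem.Dict Int Int) (u : Int),
    (L.foldl (fun d r => d.modify (pvUnits r) 0 (fun t => t + pvNo r)) d).getD u 0
      = d.getD u 0 + pvSumNo (pvGroup u L) := by
  induction L with
  | nil => intro d u; simp [pvGroup, pvSumNo]
  | cons r L ih =>
    intro d u
    rw [List.foldl_cons, ih]
    by_cases h : u = pvUnits r
    · have hg : pvGroup (pvUnits r) (r :: L) = r :: pvGroup (pvUnits r) L := by simp [pvGroup]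
      rw [h, PySem.Dict.getD_modify_self, hg]
      simp only [pvSumNo, List.map_cons, List.sum_cons]
      ring
    · rw [PySem.Dict.getD_modify_of_ne d 0 _ h]
      have : pvGroup u (r :: L) = pvGroup u L := by
        simp only [pvGroup, List.filter_cons]
        rw [if_neg (by simp; omega)]
      rw [this]

lemma pvTotals_getD (bt : List (List Int)) (u : Int) :
    (pvTotals bt).getD u 0 = pvSumNo (pvGroup u bt) := by
  rw [pvTotals, pvTotals_getD_aux]
  simp [PySem.Dict.getD, PySem.Dict.get?, PySem.Dict.empty]

lemma pvTotals_keys (bt : List (List Int)) :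
    (pvTotals bt).keys = PySem.Set.ofList (bt.map pvUnits) := by
  rw [pvTotals, PySem.Dict.keys_foldl_modify_key bt pvUnits 0 (fun _ r t => t + pvNo r)]
  rw [PySem.Dict.keys_empty]
  rw [PySem.Set.ofList_eq_foldl]
  rfl

-- ===== VERDICT (by name: the statement is the Claim_ definition above) =====
theorem maximum_units_1_spec : Claim_equal_maximum_units_1 := by
  intro bt ts _ hpre
  unfold Spec_maximum_units_1 maximum_units_1 maximum_units_1_alt
  set S := PySem.List.sorted bt pvUnits true with hS
  set d := pvTotals bt with hd
  set us := PySem.List.sorted d.keys (fun u => u) true with hus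
  have hpw : List.Pairwise (fun a b => pvUnits b ≤ pvUnits a) S :=
    PySem.List.sorted_pairwise_rev bt pvUnits
  have hc : ∀ r ∈ S, 0 ≤ pvNo r := by
    intro r hr
    exact (hpre r ((PySem.List.mem_sorted bt pvUnits true r).mp hr)).2
  have hndk : d.keys.Nodup := by
    rw [hd, pvTotals_keys]; exact PySem.Set.nodup_ofList _
  have hndus : us.Nodup := ((PySem.List.sorted_perm d.keys (fun u => u) true).nodup_iff).mpr hndk
  have husd : List.Pairwise (fun a b : Int => b < a) us := by
    have h1 : List.Pairwise (fun a b : Int => b ≤ a) us :=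
      PySem.List.sorted_pairwise_rev d.keys (fun u => u)
    have := List.Pairwise.and h1 hndus
    exact this.imp (fun h => by omega)
  have hmem : ∀ u, u ∈ us ↔ ∃ r ∈ S, pvUnits r = u := by
    intro u
    rw [hus, PySem.List.mem_sorted, hd, pvTotals_keys, PySem.Set.mem_ofList]
    constructor
    · intro h
      obtain ⟨r, hr, hru⟩ := List.mem_map.mp h
      exact ⟨r, (PySem.List.mem_sorted bt pvUnits true r).mpr hr, hru⟩
    · intro ⟨r, hr, hru⟩
      exact List.mem_map.mpr ⟨r, (PySem.List.mem_sorted bt pvUnits true r).mp hr, hru⟩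
  have hgroups : ∀ u, pvSumNo (pvGroup u S) = pvSumNo (pvGroup u bt) := by
    intro u
    have hperm : (pvGroup u S).Perm (pvGroup u bt) :=
      (PySem.List.sorted_perm bt pvUnits true).filter _
    exact (hperm.map pvNo).sum_eq
  have ht : ∀ u ∈ us, d.getD u 0 = pvSumNo (pvGroup u S) := by
    intro u _
    rw [hd, pvTotals_getD, hgroups]
  calc pvLoopA S ts 0 = pvLoopT (fun u => d.getD u 0) us ts 0 :=
        pvMain (S.length + 1) S (by omega) hpw hc us _ husd hmem ht ts 0
    _ = pvLoopB d us ts 0 := (pvLoopB_eq_loopT d us ts 0).symm
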